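-- pv_equiv track=rewrite | github.com/Girigius/Project_Euler | problem_12_v1.py | prime_fact_to_num_fact
-- ===== SOURCE A (Python) =====
-- def prime_fact_to_num_fact(prime_fact_lst):
--     prime_fact_dict = {}
--     num_fact = 1
--
--     for i in prime_fact_lst:
--         if i in prime_fact_dict:
--             prime_fact_dict[i] += 1
--         else:
--             prime_fact_dict[i] = 1
--
--     for value in prime_fact_dict.values():
--         num_fact *= value + 1
--
--     return num_fact
-- ===== SOURCE B (Python) =====
-- def prime_fact_to_num_fact(prime_fact_lst):
--     num_fact = 1
--     run = 0
--     prev = None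
--     for p in sorted(prime_fact_lst):
--         if run and p == prev:
--             run += 1
--         else:
--             if run:
--                 num_fact *= run + 1
--             prev = p
--             run = 1
--     if run:
--         num_fact *= run + 1
--     return num_fact
-- ===== Notes on version B (the rewrite author's own statement) =====
-- stated objective: alternative
-- what changed: Replaces the dict frequency counter with sort-then-group: one pass over sorted(prime_fact_lst) tracking the previous element and current run length, multiplying (run+1) into the accumulator at each run boundary.
import Mathlib
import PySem

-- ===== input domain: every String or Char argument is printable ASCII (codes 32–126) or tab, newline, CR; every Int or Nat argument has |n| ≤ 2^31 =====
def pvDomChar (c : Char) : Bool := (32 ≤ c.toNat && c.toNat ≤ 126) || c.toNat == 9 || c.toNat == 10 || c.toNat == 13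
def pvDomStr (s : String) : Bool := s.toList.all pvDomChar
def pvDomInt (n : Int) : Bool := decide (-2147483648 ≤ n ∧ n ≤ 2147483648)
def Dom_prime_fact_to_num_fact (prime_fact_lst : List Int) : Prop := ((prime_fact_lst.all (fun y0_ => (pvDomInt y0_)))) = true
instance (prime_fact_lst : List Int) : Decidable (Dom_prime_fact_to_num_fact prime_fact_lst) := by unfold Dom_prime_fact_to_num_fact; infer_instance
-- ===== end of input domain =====

-- B replaces A's dict frequency counter by sort-then-run-length grouping (alternative decomposition, same result).

-- ===== PORT A =====
def prime_fact_to_num_fact (prime_fact_lst : List Int) : Int :=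
  let prime_fact_dict : PySem.Dict Int Int :=
    prime_fact_lst.foldl
      (fun d i =>
        if d.contains i then d.insert i (d.getD i 0 + 1)
        else d.insert i 1)
      PySem.Dict.empty
  prime_fact_dict.values.foldl (fun num_fact value => num_fact * (value + 1)) 1

-- ===== PORT B =====
-- state of Source B's loop: (num_fact, run, prev)
def pvStepB (st : Int × Int × Option Int) (p : Int) : Int × Int × Option Int :=
  if st.2.1 ≠ 0 ∧ st.2.2 = some p then (st.1, st.2.1 + 1, st.2.2)
  else ((if st.2.1 ≠ 0 then st.1 * (st.2.1 + 1) else st.1), 1, some p)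

-- the final 'if run: num_fact *= run + 1'
def pvFinB (st : Int × Int × Option Int) : Int :=
  if st.2.1 ≠ 0 then st.1 * (st.2.1 + 1) else st.1

def prime_fact_to_num_fact_alt (prime_fact_lst : List Int) : Int :=
  pvFinB ((PySem.List.sorted prime_fact_lst (fun x => x) false).foldl pvStepB (1, 0, none))

-- ===== PRECONDITION & SPEC =====
def Spec_prime_fact_to_num_fact (prime_fact_lst : List Int) (out : Int) : Prop := out = prime_fact_to_num_fact_alt prime_fact_lst
instance (prime_fact_lst : List Int) (out : Int) : Decidable (Spec_prime_fact_to_num_fact prime_fact_lst out) := by unfold Spec_prime_fact_to_num_fact; infer_instance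

-- ===== CLAIM (what is proved, stated in full; the proofs are below) =====
def Claim_equal_prime_fact_to_num_fact : Prop := ∀ (prime_fact_lst : List Int), Dom_prime_fact_to_num_fact prime_fact_lst → Spec_prime_fact_to_num_fact prime_fact_lst (prime_fact_to_num_fact prime_fact_lst)

-- ===== LEMMAS AND PROOFS =====

-- the common value: product over the distinct elements of (multiplicity + 1)
def pvP (l : List Int) : Int :=
  ((PySem.List.dedup l).map (fun k => ((l.count k : Int) + 1))).prod

theorem pvP_perm {l1 l2 : List Int} (h : l1.Perm l2) : pvP l1 = pvP l2 := by
  have hd : (PySem.List.dedup l1).Perm (PySem.List.dedup l2) := by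
    rw [List.perm_ext_iff_of_nodup (PySem.List.nodup_dedup _) (PySem.List.nodup_dedup _)]
    intro x
    simp [h.mem_iff]
  have hc : ∀ k, l1.count k = l2.count k := fun k => h.count_eq k
  calc pvP l1
      = ((PySem.List.dedup l1).map (fun k => ((l2.count k : Int) + 1))).prod := by
        unfold pvP
        congr 1
        exact List.map_congr_left (fun k _ => by rw [hc k])
    _ = pvP l2 := (hd.map _).prod_eq

theorem pv_foldl_mul (xs : List Int) (a : Int) :
    xs.foldl (fun acc v => acc * (v + 1)) a = a * (xs.map (fun v => v + 1)).prod := by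
  induction xs generalizing a with
  | nil => simp
  | cons x xs ih => simp [ih, mul_assoc]

-- A computes pvP
theorem pvA_eq (l : List Int) : prime_fact_to_num_fact l = pvP l := by
  have hfun : (fun (d : PySem.Dict Int Int) i =>
        if d.contains i then d.insert i (d.getD i 0 + 1) else d.insert i 1) =
      (fun (d : PySem.Dict Int Int) i => d.insert i (d.getD i 0 + 1)) := by
    funext d i
    by_cases h : d.contains i = true
    · simp [h]
    · have hget : d.get? i = none := by
        rw [PySem.Dict.get?_eq_none_iff_contains]
        simpa using h
      simp [h, PySem.Dict.getD, hget]
  show (l.foldl (fun d i =>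
        if d.contains i then d.insert i (d.getD i 0 + 1) else d.insert i 1)
        PySem.Dict.empty).values.foldl (fun a v => a * (v + 1)) 1 = pvP l
  rw [hfun, PySem.Dict.foldl_insert_getD_add_one_eq_counter,
    PySem.Dict.values_eq_map_keys _ (PySem.Dict.nodup_keys_counter l) 0, pv_foldl_mul]
  simp [pvP, PySem.Dict.keys_counter, PySem.Dict.getD_counter, List.map_map]
  rfl

-- on a ≤-chain bounded below by x, x does not survive dropping its own run
theorem pv_notmem_dropWhile (xs : List Int) (x : Int)
    (hp : xs.Pairwise (· ≤ ·)) (hb : ∀ y ∈ xs, x ≤ y) :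
    x ∉ xs.dropWhile (fun y => y == x) := by
  induction xs with
  | nil => simp
  | cons y ys ih =>
    rw [List.dropWhile_cons]
    by_cases h : (y == x) = true
    · simp only [h, if_pos]
      exact ih hp.tail (fun z hz => hb z (List.mem_cons_of_mem _ hz))
    · simp only [h]
      intro hmem
      have hyx : y ≠ x := by simpa using h
      rcases List.mem_cons.mp hmem with rfl | hx
      · exact hyx rfl
      · have h1 : y ≤ x := (List.pairwise_cons.mp hp).1 x hx
        have h2 : x ≤ y := hb y (List.mem_cons_self)
        exact hyx (le_antisymm h1 h2)

-- pvP of a list that starts with its full run of x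
theorem pvP_cons_group (x : Int) (t r : List Int)
    (ht : ∀ y ∈ t, y = x) (hr : x ∉ r) :
    pvP (x :: (t ++ r)) = ((t.length : Int) + 2) * pvP r := by
  set s : List Int := x :: (t ++ r) with hs
  have hperm : (PySem.List.dedup s).Perm (x :: PySem.List.dedup r) := by
    rw [List.perm_ext_iff_of_nodup (PySem.List.nodup_dedup _)
      (List.nodup_cons.mpr ⟨by simpa [PySem.List.mem_dedup] using hr, PySem.List.nodup_dedup _⟩)]
    intro z
    simp only [PySem.List.mem_dedup, hs, List.mem_cons, List.mem_append]
    constructor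
    · rintro (rfl | hz | hz)
      · exact Or.inl rfl
      · exact Or.inl (ht z hz)
      · exact Or.inr hz
    · rintro (rfl | hz)
      · exact Or.inl rfl
      · exact Or.inr (Or.inr hz)
  have hcx : (s.count x : Int) = (t.length : Int) + 1 := by
    have htc : t.count x = t.length := List.count_eq_length.mpr (fun y hy => by simp [ht y hy])
    have hrc : r.count x = 0 := List.count_eq_zero.mpr hr
    have : s.count x = t.length + 1 := by
      simp [hs, List.count_append, htc, hrc]
    rw [this]; push_cast; ring
  have hck : ∀ k ∈ PySem.List.dedup r, (s.count k : Int) = (r.count k : Int) := by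
    intro k hk
    have hkr : k ∈ r := (PySem.List.mem_dedup _ _).mp hk
    have hkx : k ≠ x := fun h => hr (h ▸ hkr)
    have htc : t.count k = 0 := List.count_eq_zero.mpr (fun hkt => hkx (ht k hkt))
    have : s.count k = r.count k := by
      simp [hs, List.count_cons, List.count_append, htc]
      exact fun h => hkx h.symm
    rw [this]
  calc pvP s
      = ((x :: PySem.List.dedup r).map (fun k => ((s.count k : Int) + 1))).prod :=
        (hperm.map _).prod_eq
    _ = ((s.count x : Int) + 1) * ((PySem.List.dedup r).map (fun k => ((s.count k : Int) + 1))).prod := by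
        simp
    _ = ((t.length : Int) + 2) * pvP r := by
        rw [hcx]
        unfold pvP
        rw [List.map_congr_left (fun k hk => by rw [hck k hk])]
        ring_nf

-- Source B's loop from a live run-state (run ≥ 1, prev = some x) on a sorted tail
theorem pvFoldB_eq (n : ℕ) : ∀ (s : List Int), s.length = n →
    s.Pairwise (· ≤ ·) → ∀ (num run x : Int), 1 ≤ run → (∀ y ∈ s, x ≤ y) →
    pvFinB (s.foldl pvStepB (num, run, some x)) =
      num * (run + ((s.takeWhile (fun y => y == x)).length : Int) + 1) *
        pvP (s.dropWhile (fun y => y == x)) := by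
  induction n using Nat.strong_induction_on with
  | _ n ih =>
    intro s hn hp num run x hrun hb
    match s with
    | [] =>
      simp [pvFinB, pvP, PySem.List.dedup]
      intro h
      subst h
      ring
    | y :: ys =>
      by_cases hyx : (y == x) = true
      · have hyx' : y = x := by simpa using hyx
        have hstep : pvStepB (num, run, some x) y = (num, run + 1, some x) := by
          subst hyx'
          simp only [pvStepB]
          split
          · rfl
          · rename_i hcond
            exact absurd ⟨by omega, by trivial⟩ hcond
        rw [List.foldl_cons, hstep,
          ih ys.length (by simp at hn; omega) ys rfl hp.tail num (run + 1) x (by omega)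
            (fun z hz => hb z (List.mem_cons_of_mem _ hz))]
        rw [List.takeWhile_cons, List.dropWhile_cons]
        simp only [hyx, if_true, List.length_cons]
        push_cast
        ring
      · have hyx' : ¬ (x = y) := fun h => by simp [h] at hyx
        have hstep : pvStepB (num, run, some x) y = (num * (run + 1), 1, some y) := by
          simp only [pvStepB]
          rw [if_neg (by simp; intro _ h; exact hyx' (by simpa using h)),
            if_pos (by omega)]
        have hbnd : ∀ z ∈ ys, y ≤ z := (List.pairwise_cons.mp hp).1
        rw [List.foldl_cons, hstep,
          ih ys.length (by simp at hn; omega) ys rfl hp.tail (num * (run + 1)) 1 y le_rfl hbnd]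
        have hgrp : pvP (y :: ys) =
            (((ys.takeWhile (fun z => z == y)).length : Int) + 2) *
              pvP (ys.dropWhile (fun z => z == y)) := by
          have hsplit : ys = ys.takeWhile (fun z => z == y) ++ ys.dropWhile (fun z => z == y) :=
            (List.takeWhile_append_dropWhile).symm
          rw [show (y :: ys) = y :: (ys.takeWhile (fun z => z == y) ++ ys.dropWhile (fun z => z == y)) by
            rw [← hsplit]]
          exact pvP_cons_group y _ _ (fun z hz => by simpa using List.mem_takeWhile_imp hz)
            (pv_notmem_dropWhile ys y hp.tail hbnd)
        rw [List.takeWhile_cons, List.dropWhile_cons]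
        simp only [hyx, Bool.false_eq_true, if_false]
        rw [hgrp]
        simp
        ring

theorem pvB_eq (l : List Int) : prime_fact_to_num_fact_alt l = pvP l := by
  unfold prime_fact_to_num_fact_alt
  have hp : (PySem.List.sorted l (fun x => x) false).Pairwise (· ≤ ·) := by
    simpa using PySem.List.sorted_pairwise l (fun x => x)
  have hperm := PySem.List.sorted_perm l (fun x => x) false
  rw [← pvP_perm hperm]
  match hs : PySem.List.sorted l (fun x => x) false with
  | [] => simp [pvFinB, pvP, PySem.List.dedup]
  | x :: xs =>
    rw [hs] at hp
    have hstep : pvStepB (1, 0, none) x = (1, 1, some x) := by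
      simp [pvStepB]
    rw [List.foldl_cons, hstep,
      pvFoldB_eq xs.length xs rfl hp.tail 1 1 x le_rfl (List.pairwise_cons.mp hp).1]
    have hsplit : xs = xs.takeWhile (fun z => z == x) ++ xs.dropWhile (fun z => z == x) :=
      (List.takeWhile_append_dropWhile).symm
    rw [show (x :: xs) = x :: (xs.takeWhile (fun z => z == x) ++ xs.dropWhile (fun z => z == x)) by
      rw [← hsplit]]
    rw [pvP_cons_group x _ _ (fun z hz => by simpa using List.mem_takeWhile_imp hz)
      (pv_notmem_dropWhile xs x hp.tail (List.pairwise_cons.mp hp).1)]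
    ring

-- ===== VERDICT (by name: the statement is the Claim_ definition above) =====
theorem prime_fact_to_num_fact_spec : Claim_equal_prime_fact_to_num_fact := by
  intro l _
  show prime_fact_to_num_fact l = prime_fact_to_num_fact_alt l
  rw [pvA_eq, pvB_eq]
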